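-- pv_equiv track=rewrite | github.com/EdYashida/Maquina_diferencial | maquina_diferencial_recursaototal.py | preenchelinha
-- ===== SOURCE A (Python) =====
-- def preenchelinha(i,j,n,tabela,linha):  #lida com o laço de j
--     if j==n-i-1:
--         v = tabela[i][j] - tabela[i][j + 1]  # define valor pela diferença de 2 seguidos da linha anterior
--         linha.append(v)  # adiciona valor à linha
--         return linha     # retorna linha
--     else:
--         preenchelinha(i,j+1,n,tabela,linha) #vai pros elementos sucessores da lista de diferença
--         v = tabela[i][j] - tabela[i][j + 1]
--         linha.append(v)  #adiciona na mesma linha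
--         return linha
-- ===== SOURCE B (Python) =====
-- def preenchelinha(i, j, n, tabela, linha):
--     # iterative replacement for the recursion: walk jj down from the top index
--     # n-i-1 to j (the recursion's base case first), appending each consecutive
--     # difference directly; same equality termination test as the recursion
--     jj = n - i - 1
--     while True:
--         linha.append(tabela[i][jj] - tabela[i][jj + 1])
--         if jj == j:
--             return linha
--         jj -= 1
-- ===== Notes on version B (the rewrite author's own statement) =====
-- stated objective: simpler
-- what changed: Replaces the recurse-then-append recursion with a single explicit countdown while-loop from jj = n-i-1 down to j, appending each difference directly (same in-place mutation of linha, O(1) stack).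
import Mathlib
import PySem

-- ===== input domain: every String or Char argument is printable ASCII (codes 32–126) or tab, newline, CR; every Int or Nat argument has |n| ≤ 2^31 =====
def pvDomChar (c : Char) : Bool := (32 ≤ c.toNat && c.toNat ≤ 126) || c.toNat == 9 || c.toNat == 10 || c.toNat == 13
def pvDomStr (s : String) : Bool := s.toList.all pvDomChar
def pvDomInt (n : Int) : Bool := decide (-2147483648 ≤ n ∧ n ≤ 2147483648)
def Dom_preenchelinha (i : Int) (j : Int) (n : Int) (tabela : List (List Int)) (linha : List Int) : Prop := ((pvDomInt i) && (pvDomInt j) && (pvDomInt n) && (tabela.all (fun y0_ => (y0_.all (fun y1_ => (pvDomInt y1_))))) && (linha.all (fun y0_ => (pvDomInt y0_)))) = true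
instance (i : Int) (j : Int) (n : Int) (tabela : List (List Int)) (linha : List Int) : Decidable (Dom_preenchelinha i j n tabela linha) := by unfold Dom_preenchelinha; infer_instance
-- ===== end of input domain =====

-- B replaces A's recurse-then-append recursion by one explicit countdown loop
-- (simpler); equivalence is about the RETURN value — both Pythons also mutate
-- `linha` in place in the same way.


-- ===== PORT A =====
-- Option threads the IndexError of tabela[i][...] ; the final branch (j past
-- n-i-1) is where the Python recursion never reaches its base case and raises
-- RecursionError — `none` there, excluded by Pre_.
def preenchelinhaAux (i : Int) (n : Int) (tabela : List (List Int)) (j : Int) (linha : List Int) : Option (List Int) :=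
  if j = n - i - 1 then
    (PySem.List.pyGet? tabela i).bind (fun row =>
      (PySem.List.pyGet? row j).bind (fun x =>
        (PySem.List.pyGet? row (j + 1)).map (fun y => linha ++ [x - y])))
  else if _h : j < n - i - 1 then
    (preenchelinhaAux i n tabela (j + 1) linha).bind (fun lin =>
      (PySem.List.pyGet? tabela i).bind (fun x0 =>
        (PySem.List.pyGet? x0 j).bind (fun x =>
          (PySem.List.pyGet? x0 (j + 1)).map (fun y => lin ++ [x - y]))))
  else none
termination_by (n - i - 1 - j).toNat
decreasing_by omega

def preenchelinha (i : Int) (j : Int) (n : Int) (tabela : List (List Int)) (linha : List Int) : List Int :=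
  (preenchelinhaAux i n tabela j linha).getD linha

-- ===== PORT B =====
-- Source B: jj = n-i-1; while True: linha.append(tabela[i][jj]-tabela[i][jj+1]);
--       if jj == j: return linha; jj -= 1
-- Option threads the IndexError. The loop runs exactly (n-i-1) - j + 1
-- iterations when it returns (jj counts down from n-i-1 to j), so that
-- number is the structural fuel; fuel 0 / exhaustion corresponds to the
-- runs on which the Python loop never meets jj == j and raises (outside Pre_).
def preenchelinhaLoop (i : Int) (j : Int) (tabela : List (List Int)) : Nat → Int → List Int → Option (List Int)
  | 0, _, _ => none
  | fuel + 1, jj, linha =>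
    (PySem.List.pyGet? tabela i).bind (fun row =>
      (PySem.List.pyGet? row jj).bind (fun x =>
        (PySem.List.pyGet? row (jj + 1)).bind (fun y =>
          if jj = j then some (linha ++ [x - y])
          else preenchelinhaLoop i j tabela fuel (jj - 1) (linha ++ [x - y]))))

def preenchelinha_alt (i : Int) (j : Int) (n : Int) (tabela : List (List Int)) (linha : List Int) : List Int :=
  (preenchelinhaLoop i j tabela ((n - i - 1 - j).toNat + 1) (n - i - 1) linha).getD linha

-- ===== PRECONDITION & SPEC =====
-- Pre_ is exactly the set of inputs on which the Python A returns normally: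
-- j must reach the base case (j ≤ n-i-1), row i must exist, and the extreme
-- indices j and n-i used on that row must be in Python's admitted index range
-- -len ≤ k < len; such inputs stay inside the claim and both ports handle
-- them with PySem.List.pyGet?.
def Pre_preenchelinha (i : Int) (j : Int) (n : Int) (tabela : List (List Int)) (linha : List Int) : Prop :=
  j ≤ n - i - 1 ∧ PySem.Raise.InRange tabela.length i ∧
  PySem.Raise.InRange ((PySem.List.pyGet? tabela i).getD []).length j ∧
  PySem.Raise.InRange ((PySem.List.pyGet? tabela i).getD []).length (n - i)
instance (i : Int) (j : Int) (n : Int) (tabela : List (List Int)) (linha : List Int) : Decidable (Pre_preenchelinha i j n tabela linha) := by unfold Pre_preenchelinha; infer_instance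

def pvWitness_preenchelinha : Int × Int × Int × List (List Int) × List Int :=
  (0, 0, 3, [[5, 3, 2, 9]], [])

def Spec_preenchelinha (i : Int) (j : Int) (n : Int) (tabela : List (List Int)) (linha : List Int) (out : List Int) : Prop := out = preenchelinha_alt i j n tabela linha
instance (i : Int) (j : Int) (n : Int) (tabela : List (List Int)) (linha : List Int) (out : List Int) : Decidable (Spec_preenchelinha i j n tabela linha out) := by unfold Spec_preenchelinha; infer_instance

-- ===== CLAIM (what is proved, stated in full; the proofs are below) =====
def Claim_equal_preenchelinha : Prop := ∀ (i : Int) (j : Int) (n : Int) (tabela : List (List Int)) (linha : List Int), Dom_preenchelinha i j n tabela linha → Pre_preenchelinha i j n tabela linha → Spec_preenchelinha i j n tabela linha (preenchelinha i j n tabela linha)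


-- ===== LEMMAS AND PROOFS =====

-- splitting the countdown range at its last element
lemma pyRange_neg_one_snoc (a j : Int) (h : j ≤ a) :
    PySem.List.pyRange a (j - 1) (-1) = PySem.List.pyRange a j (-1) ++ [j] := by
  rw [PySem.List.pyRange_neg_one_eq_reverse, PySem.List.pyRange_neg_one_eq_reverse]
  have h1 : j - 1 + 1 = j := by ring
  rw [h1, PySem.List.pyRange_one_cons (by omega : j < a + 1)]
  simp

-- A's recursion equals B's countdown fold (as Option computations; a failing
-- index access makes both `none`, so no index hypotheses are needed)
lemma aux_eq_fold (i n : Int) (tabela : List (List Int)) (linha : List Int) :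
    ∀ (d : Nat) (j : Int), j = n - i - 1 - (d : Int) →
    preenchelinhaAux i n tabela j linha =
      (PySem.List.pyRange (n - i - 1) (j - 1) (-1)).foldl
        (fun acc jj =>
          acc.bind (fun lin =>
            (PySem.List.pyGet? tabela i).bind (fun row =>
              (PySem.List.pyGet? row jj).bind (fun x =>
                (PySem.List.pyGet? row (jj + 1)).map (fun y => lin ++ [x - y])))))
        (some linha) := by
  intro d
  induction d with
  | zero =>
    intro j hj
    have hj' : j = n - i - 1 := by omega
    rw [preenchelinhaAux, if_pos hj']
    rw [pyRange_neg_one_snoc _ _ (le_of_eq hj'),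
        PySem.List.pyRange_neg_one_eq_nil (le_of_eq hj'.symm)]
    simp [Option.bind]
  | succ d ih =>
    intro j hj
    have hlt : j < n - i - 1 := by omega
    rw [preenchelinhaAux, if_neg (by omega), dif_pos hlt]
    rw [ih (j + 1) (by omega)]
    rw [pyRange_neg_one_snoc (n - i - 1) j (by omega)]
    have h1 : j + 1 - 1 = j := by ring
    rw [h1, List.foldl_append]
    simp


-- a fold whose step maps `none` to `none` stays `none`
lemma foldl_none (g : Option (List Int) → Int → Option (List Int))
    (hg : ∀ jj, g none jj = none) (l : List Int) : l.foldl g none = none := by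
  induction l with
  | nil => rfl
  | cons hd tl ih => rw [List.foldl_cons, hg]; exact ih

-- B's countdown loop equals the same countdown fold
lemma loop_eq_fold (i j : Int) (tabela : List (List Int)) :
    ∀ (d : Nat) (a : Int) (linha : List Int), a = j + (d : Int) →
    preenchelinhaLoop i j tabela (d + 1) a linha =
      (PySem.List.pyRange a (j - 1) (-1)).foldl
        (fun acc jj =>
          acc.bind (fun lin =>
            (PySem.List.pyGet? tabela i).bind (fun row =>
              (PySem.List.pyGet? row jj).bind (fun x =>
                (PySem.List.pyGet? row (jj + 1)).map (fun y => lin ++ [x - y])))))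
        (some linha) := by
  intro d
  induction d with
  | zero =>
    intro a linha ha
    have ha' : a = j := by omega
    subst ha'
    rw [PySem.List.pyRange_neg_one_cons (by omega : a - 1 < a),
        PySem.List.pyRange_neg_one_eq_nil (by omega : a - 1 ≤ a - 1),
        List.foldl_cons, List.foldl_nil, preenchelinhaLoop]
    rcases h1 : PySem.List.pyGet? tabela i with _ | row
    · simp
    · rcases h2 : PySem.List.pyGet? row a with _ | x
      · simp [h2]
      · rcases h3 : PySem.List.pyGet? row (a + 1) with _ | y
        · simp [h2, h3]
        · simp [h2, h3]
  | succ d ih =>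
    intro a linha ha
    set f : Option (List Int) → Int → Option (List Int) := fun acc jj =>
      acc.bind (fun lin =>
        (PySem.List.pyGet? tabela i).bind (fun row =>
          (PySem.List.pyGet? row jj).bind (fun x =>
            (PySem.List.pyGet? row (jj + 1)).map (fun y => lin ++ [x - y])))) with hf
    have hfnone : ∀ jj, f none jj = none := fun jj => by rw [hf]; rfl
    rw [PySem.List.pyRange_neg_one_cons (by omega : j - 1 < a), List.foldl_cons,
        preenchelinhaLoop]
    rcases h1 : PySem.List.pyGet? tabela i with _ | row
    · have hstep : f (some linha) a = none := by rw [hf]; simp [h1]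
      rw [hstep, foldl_none f hfnone]
      simp
    · rcases h2 : PySem.List.pyGet? row a with _ | x
      · have hstep : f (some linha) a = none := by rw [hf]; simp [h1, h2]
        rw [hstep, foldl_none f hfnone]
        simp [h2]
      · rcases h3 : PySem.List.pyGet? row (a + 1) with _ | y
        · have hstep : f (some linha) a = none := by rw [hf]; simp [h1, h2, h3]
          rw [hstep, foldl_none f hfnone]
          simp [h2, h3]
        · have hstep : f (some linha) a = some (linha ++ [x - y]) := by
            rw [hf]; simp [h1, h2, h3]
          rw [hstep]
          simp only [Option.bind_some, h2, h3]
          rw [if_neg (by omega : ¬ a = j), ih (a - 1) (linha ++ [x - y]) (by omega)]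

-- ===== VERDICT (by name: the statement is the Claim_ definition above) =====
theorem preenchelinha_spec : Claim_equal_preenchelinha := by
  intro i j n tabela linha _hdom hpre
  obtain ⟨h1, -, -, -⟩ := hpre
  unfold Spec_preenchelinha preenchelinha preenchelinha_alt
  rw [aux_eq_fold i n tabela linha (n - i - 1 - j).toNat j (by omega),
      loop_eq_fold i j tabela (n - i - 1 - j).toNat (n - i - 1) linha (by omega)]
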